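-- pv_equiv track=rewrite | github.com/ashaysriv/flikcer | flikcer/epilepsy/utils.py | get_fin_frame
-- ===== SOURCE A (Python) =====
-- def get_fin_frame(table):
--     def getSign(x):
--         if x > 0 :
--             sign = "pos"
--         else:
--             sign = "neg"
--         return sign
--
--     fin = []
--     fin_frames = []
--
--     cum = table[0]
--     fin_frame = 1
--
--     for change in range(len(table)-1):
--         if getSign(table[change]) == getSign(table[change + 1]):
--             cum += table[change + 1]
--             fin_frame += 1
--         else:
--             fin.append(cum)
--             fin_frames.append(fin_frame)
--             cum = table[change + 1]
--             fin_frame = change + 2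
--     return fin_frames, fin
-- ===== SOURCE B (Python) =====
-- def get_fin_frame(table):
--     prefix = [0]
--     for x in table:
--         prefix.append(prefix[-1] + x)
--     cuts = [i + 1 for i, (a, b) in enumerate(zip(table, table[1:])) if (a > 0) != (b > 0)]
--     sums = [prefix[q] - prefix[p] for p, q in zip([0] + cuts, cuts)]
--     return cuts, sums
-- ===== Notes on version B (the rewrite author's own statement) =====
-- stated objective: alternative
-- what changed: Replaces A's single pass with running cum/fin_frame accumulators by three staged passes: build a prefix-sum table, detect sign-change boundary indices over adjacent pairs, and compute each emitted sum as a difference of prefix sums between consecutive boundaries; the last run is never emitted because only boundaries are listed, with no drop-last step.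
import Mathlib
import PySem

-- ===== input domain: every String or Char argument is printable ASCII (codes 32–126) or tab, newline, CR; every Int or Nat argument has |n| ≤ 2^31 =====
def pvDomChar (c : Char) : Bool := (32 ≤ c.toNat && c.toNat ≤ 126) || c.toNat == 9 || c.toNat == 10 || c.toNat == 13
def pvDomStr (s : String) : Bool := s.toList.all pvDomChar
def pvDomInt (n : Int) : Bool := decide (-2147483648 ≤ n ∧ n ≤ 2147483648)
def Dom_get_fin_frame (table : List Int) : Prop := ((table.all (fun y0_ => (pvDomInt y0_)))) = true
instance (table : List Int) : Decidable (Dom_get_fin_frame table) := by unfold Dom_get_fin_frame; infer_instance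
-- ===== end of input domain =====

-- B recomputes the same result by staged passes (prefix-sum table, sign-change boundary
-- indices, sums as prefix differences) instead of A's single accumulator loop.

-- ===== PORT A =====
def get_fin_frame (table : List Int) : List Int × List Int :=
  let getSign : Int → String := fun x => if x > 0 then "pos" else "neg"
  let fin : List Int := []
  let fin_frames : List Int := []
  let cum := PySem.List.pyGetD table 0 0          -- table[0]; the IndexError on [] is excluded by Pre_
  let fin_frame : Int := 1
  let st := (PySem.List.pyRange 0 ((table.length : Int) - 1) 1).foldl
    (fun st change =>
      if getSign (PySem.List.pyGetD table change 0) == getSign (PySem.List.pyGetD table (change + 1) 0) then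
        (st.1, st.2.1, st.2.2.1 + PySem.List.pyGetD table (change + 1) 0, st.2.2.2 + 1)
      else
        (st.1 ++ [st.2.2.1], st.2.1 ++ [st.2.2.2], PySem.List.pyGetD table (change + 1) 0, change + 2))
    (fin, fin_frames, cum, fin_frame)
  (st.2.1, st.1)

-- ===== PORT B =====
def get_fin_frame_alt (table : List Int) : List Int × List Int :=
  -- prefix-sum table: prefix = [0]; for x in table: prefix.append(prefix[-1] + x)
  let pfx := table.foldl (fun ps x => ps ++ [PySem.List.pyGetD ps (-1) 0 + x]) [(0 : Int)]
  -- boundary indices: [i+1 for i,(a,b) in enumerate(zip(table, table[1:])) if (a>0)!=(b>0)]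
  let cuts := (PySem.List.enumerate (table.zip (PySem.List.slice table (some 1) none)) 0).filterMap
    (fun p => if (decide (0 < p.2.1) != decide (0 < p.2.2)) then some (p.1 + 1) else none)
  -- sums: [prefix[q]-prefix[p] for p,q in zip([0]+cuts, cuts)]
  let sums := (((0 : Int) :: cuts).zip cuts).map
    (fun q => PySem.List.pyGetD pfx q.2 0 - PySem.List.pyGetD pfx q.1 0)
  (cuts, sums)

-- ===== PRECONDITION & SPEC =====
-- Pre_ excludes only the empty table, on which A's 'table[0]' raises IndexError.
def Pre_get_fin_frame (table : List Int) : Prop := table ≠ []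
instance (table : List Int) : Decidable (Pre_get_fin_frame table) := by unfold Pre_get_fin_frame; infer_instance
def pvWitness_get_fin_frame : List Int := [1, -2, 3]

def Spec_get_fin_frame (table : List Int) (out : List Int × List Int) : Prop := out = get_fin_frame_alt table
instance (table : List Int) (out : List Int × List Int) : Decidable (Spec_get_fin_frame table out) := by unfold Spec_get_fin_frame; infer_instance

-- ===== CLAIM (what is proved, stated in full; the proofs are below) =====
def Claim_equal_get_fin_frame : Prop := ∀ (table : List Int), Dom_get_fin_frame table → Pre_get_fin_frame table → Spec_get_fin_frame table (get_fin_frame table)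

-- ===== LEMMAS AND PROOFS =====

-- Common characterisation of both programs: the 1-based sign-change positions and the
-- per-run sums (the last run never emitted).
def pvCuts (j : Int) (x : Int) : List Int → List Int
  | [] => []
  | y :: ys => if decide (0 < x) == decide (0 < y) then pvCuts (j + 1) y ys
               else (j + 1) :: pvCuts (j + 1) y ys

def pvSums (cum : Int) (x : Int) : List Int → List Int
  | [] => []
  | y :: ys => if decide (0 < x) == decide (0 < y) then pvSums (cum + y) y ys
               else cum :: pvSums y y ys

-- A's loop as structural recursion on the tail of the table.
def pvSpecA (x : Int) (ys : List Int) (j cum : Int) (fin fins : List Int) : List Int × List Int × Int × Int :=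
  match ys with
  | [] => (fin, fins, cum, j + 1)
  | y :: ys' =>
      if decide (0 < x) == decide (0 < y) then pvSpecA y ys' (j + 1) (cum + y) fin fins
      else pvSpecA y ys' (j + 1) y (fin ++ [cum]) (fins ++ [j + 1])

lemma pvSign_eq (a b : Int) :
    ((if 0 < a then "pos" else "neg") == (if 0 < b then "pos" else "neg")) = (decide (0 < a) == decide (0 < b)) := by
  by_cases h1 : 0 < a <;> by_cases h2 : 0 < b <;> simp [h1, h2]

lemma pvAfold_eq_specA (ys : List Int) : ∀ (x j cum : Int) (fin fins : List Int),
    (PySem.List.enumerate ((x :: ys).zip ys) j).foldl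
      (fun st (p : Int × Int × Int) =>
        if (decide (0 < p.2.1) == decide (0 < p.2.2)) then
          (st.1, st.2.1, st.2.2.1 + p.2.2, st.2.2.2 + 1)
        else
          (st.1 ++ [st.2.2.1], st.2.1 ++ [st.2.2.2], p.2.2, p.1 + 2))
      (fin, fins, cum, j + 1)
      = pvSpecA x ys j cum fin fins := by
  induction ys with
  | nil => intro x j cum fin fins; simp [PySem.List.enumerate_nil, pvSpecA]
  | cons y ys ih =>
    intro x j cum fin fins
    simp only [List.zip_cons_cons, PySem.List.enumerate_cons, List.foldl_cons]
    cases hb : (decide (0 < x) == decide (0 < y))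
    · simp only [pvSpecA, hb, Bool.false_eq_true, if_false]
      have harith : j + 2 = (j + 1) + 1 := by ring
      rw [harith]
      exact ih y (j + 1) y (fin ++ [cum]) (fins ++ [j + 1])
    · simp only [pvSpecA, hb, if_true]
      exact ih y (j + 1) (cum + y) fin fins

lemma pvSpecA_char (ys : List Int) : ∀ (x j cum : Int) (fin fins : List Int),
    (pvSpecA x ys j cum fin fins).1 = fin ++ pvSums cum x ys ∧
    (pvSpecA x ys j cum fin fins).2.1 = fins ++ pvCuts j x ys := by
  induction ys with
  | nil => intro x j cum fin fins; simp [pvSpecA, pvSums, pvCuts]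
  | cons y ys ih =>
    intro x j cum fin fins
    cases hb : (decide (0 < x) == decide (0 < y))
    · simp only [pvSpecA, pvSums, pvCuts, hb, Bool.false_eq_true, if_false]
      have h := ih y (j + 1) y (fin ++ [cum]) (fins ++ [j + 1])
      rw [h.1, h.2]
      simp
    · simp only [pvSpecA, pvSums, pvCuts, hb, if_true]
      exact ih y (j + 1) (cum + y) fin fins

-- A returns exactly (pvCuts 0 x ys, pvSums x x ys).
lemma pvA_char (x : Int) (ys : List Int) :
    get_fin_frame (x :: ys) = (pvCuts 0 x ys, pvSums x x ys) := by
  simp only [get_fin_frame]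
  have e1 : ((List.length (x :: ys) : Int)) - 1 = ((((x :: ys).zip ys).length : Int)) := by
    simp [List.length_zip]
  rw [e1]
  have key : ∀ (st : List Int × List Int × Int × Int) (j : Int),
      j ∈ PySem.List.pyRange 0 ((((x :: ys).zip ys).length : Int)) 1 →
      (if (if PySem.List.pyGetD (x :: ys) j 0 > 0 then "pos" else "neg")
            == (if PySem.List.pyGetD (x :: ys) (j + 1) 0 > 0 then "pos" else "neg") then
          (st.1, st.2.1, st.2.2.1 + PySem.List.pyGetD (x :: ys) (j + 1) 0, st.2.2.2 + 1)
        else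
          (st.1 ++ [st.2.2.1], st.2.1 ++ [st.2.2.2], PySem.List.pyGetD (x :: ys) (j + 1) 0, j + 2))
      = (fun st (p : Int × Int × Int) =>
          if (decide (0 < p.2.1) == decide (0 < p.2.2)) then
            (st.1, st.2.1, st.2.2.1 + p.2.2, st.2.2.2 + 1)
          else
            (st.1 ++ [st.2.2.1], st.2.1 ++ [st.2.2.2], p.2.2, p.1 + 2))
          st (j, PySem.List.pyGetD ((x :: ys).zip ys) j ((0 : Int), (0 : Int))) := by
    intro st j hj
    rw [PySem.List.mem_pyRange_one] at hj
    have hjz : j < ((((x :: ys).zip ys).length : Int)) := hj.2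
    have hy : j < ((ys.length : Int)) := by simpa [List.length_zip] using hjz
    have hx1 : j < ((List.length (x :: ys) : Int)) := by simp; omega
    have hx2 : j + 1 < ((List.length (x :: ys) : Int)) := by simp; omega
    rw [PySem.List.pyGetD_eq_getElem _ _ hj.1 hjz,
        PySem.List.pyGetD_eq_getElem _ _ hj.1 hx1,
        PySem.List.pyGetD_eq_getElem _ _ (by omega : (0:Int) ≤ j + 1) hx2]
    have htn : (j + 1).toNat = j.toNat + 1 := by omega
    simp only [List.getElem_zip, htn, List.getElem_cons_succ, pvSign_eq]
  rw [PySem.List.foldl_congr_mem _ _ _ _ key]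
  have e2 := PySem.List.enumerate_eq_map_pyRange ((x :: ys).zip ys) ((0 : Int), (0 : Int))
  simp only [PySem.List.len_eq] at e2
  rw [← List.foldl_map (f := fun j => (j, PySem.List.pyGetD ((x :: ys).zip ys) j ((0 : Int), (0 : Int))))
        (g := fun st (p : Int × Int × Int) =>
          if (decide (0 < p.2.1) == decide (0 < p.2.2)) then
            (st.1, st.2.1, st.2.2.1 + p.2.2, st.2.2.2 + 1)
          else
            (st.1 ++ [st.2.2.1], st.2.1 ++ [st.2.2.2], p.2.2, p.1 + 2)),
      ← e2]
  simp only [PySem.List.pyGetD_zero_cons]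
  have hfold := pvAfold_eq_specA ys x 0 x [] []
  simp only [zero_add] at hfold
  rw [hfold]
  have h := pvSpecA_char ys x 0 x [] []
  rw [Prod.ext_iff]
  exact ⟨by rw [h.2]; simp, by rw [h.1]; simp⟩

-- B side, pass 1: the prefix fold builds List.scanl.
lemma pvFold_scanl (t : List Int) : ∀ (init : List Int) (a : Int),
    t.foldl (fun ps x => ps ++ [PySem.List.pyGetD ps (-1) 0 + x]) (init ++ [a])
      = init ++ List.scanl (· + ·) a t := by
  induction t with
  | nil => intro init a; simp [List.scanl]
  | cons x t ih =>
    intro init a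
    simp only [List.foldl_cons, PySem.List.pyGetD_neg_one_append_singleton, List.scanl_cons]
    rw [ih (init ++ [a]) (a + x)]
    simp

lemma pvScanl_map (t : List Int) : ∀ (a : Int),
    List.scanl (· + ·) a t = (List.range (t.length + 1)).map (fun k => a + (t.take k).sum) := by
  induction t with
  | nil => intro a; simp [List.scanl_nil]
  | cons x t ih =>
    intro a
    simp only [List.scanl_cons, List.length_cons]
    rw [List.range_succ_eq_map]
    simp only [List.map_cons, List.map_map]
    refine List.cons_eq_cons.mpr ⟨by simp, ?_⟩
    rw [ih (a + x)]
    apply List.map_congr_left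
    intro k _
    simp [List.take_succ_cons, add_assoc]

-- indexing the prefix table: prefix[k] = sum of the first k elements, for 0 ≤ k ≤ n.
lemma pvPfx_get (t : List Int) (k : Int) (h0 : 0 ≤ k) (h1 : k ≤ (t.length : Int)) :
    PySem.List.pyGetD ((List.range (t.length + 1)).map (fun k => (0 : Int) + (t.take k).sum)) k 0
      = (t.take k.toNat).sum := by
  have hlen : k < (((List.range (t.length + 1)).map (fun k => (0 : Int) + (t.take k).sum)).length : Int) := by
    simp; omega
  rw [PySem.List.pyGetD_eq_getElem _ _ h0 hlen]
  simp

-- chain of increments along a suffix of the table.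
def pvChain (S : Int → Int) : Int → List Int → Prop
  | _, [] => True
  | j, y :: ys => S (j + 1) = S j + y ∧ pvChain S (j + 1) ys

lemma pvChain_suffix (t : List Int) : ∀ (rest : List Int) (j : Int), 0 ≤ j →
    t.drop j.toNat = rest →
    pvChain (fun k => PySem.List.pyGetD ((List.range (t.length + 1)).map (fun k => (0 : Int) + (t.take k).sum)) k 0) j rest := by
  intro rest
  induction rest with
  | nil => intro j _ _; trivial
  | cons y ys ih =>
    intro j hj hd
    have hlt : j.toNat < t.length := by
      by_contra h
      rw [List.drop_eq_nil_of_le (by omega)] at hd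
      simp at hd
    have hy : t[j.toNat] = y := by
      have hcd : t[j.toNat] :: t.drop (j.toNat + 1) = t.drop j.toNat := List.getElem_cons_drop hlt
      rw [hd] at hcd
      exact (List.cons_eq_cons.mp hcd).1
    have hys : t.drop (j + 1).toNat = ys := by
      have : (t.drop j.toNat).tail = ys := by rw [hd]; rfl
      rw [List.tail_drop] at this
      have e : (j + 1).toNat = j.toNat + 1 := by omega
      rw [e]; exact this
    refine ⟨?_, ih (j + 1) (by omega) hys⟩
    simp only [pvPfx_get t j hj (by omega), pvPfx_get t (j + 1) (by omega) (by omega)]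
    have e : (j + 1).toNat = j.toNat + 1 := by omega
    rw [e, List.sum_take_succ t j.toNat hlt, hy]

-- B's boundary comprehension computes pvCuts.
lemma pvCuts_filterMap (ys : List Int) : ∀ (x j : Int),
    (PySem.List.enumerate ((x :: ys).zip ys) j).filterMap
        (fun p => if (decide (0 < p.2.1) != decide (0 < p.2.2)) then some (p.1 + 1) else none)
      = pvCuts j x ys := by
  induction ys with
  | nil => intro x j; simp [PySem.List.enumerate_nil, pvCuts]
  | cons y ys ih =>
    intro x j
    simp only [List.zip_cons_cons, PySem.List.enumerate_cons, List.filterMap_cons]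
    rw [ih y (j + 1)]
    cases hb : (decide (0 < x) == decide (0 < y))
    · have hb' : ¬(0 < x ↔ 0 < y) := by simpa using hb
      simp [pvCuts, hb']
    · have hb' : (0 < x ↔ 0 < y) := by simpa using hb
      simp [pvCuts, hb']

-- B's prefix-difference comprehension computes pvSums, for any S satisfying the chain.
lemma pvSums_zipmap (ys : List Int) : ∀ (S : Int → Int) (x j a cum : Int),
    pvChain S (j + 1) ys → cum = S (j + 1) - S a →
    ((a :: pvCuts j x ys).zip (pvCuts j x ys)).map (fun q => S q.2 - S q.1)
      = pvSums cum x ys := by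
  induction ys with
  | nil => intro S x j a cum _ _; simp [pvCuts, pvSums]
  | cons y ys ih =>
    intro S x j a cum hch hcum
    obtain ⟨hstep, htail⟩ := hch
    cases hb : (decide (0 < x) == decide (0 < y))
    · simp only [pvCuts, pvSums, hb, Bool.false_eq_true, if_false, List.zip_cons_cons, List.map_cons]
      congr 1
      · rw [hcum]
      · exact ih S y (j + 1) (j + 1) y htail (by rw [hstep]; ring)
    · simp only [pvCuts, pvSums, hb, if_true]
      exact ih S y (j + 1) a (cum + y) htail (by rw [hstep, hcum]; ring)

-- ===== VERDICT (by name: the statement is the Claim_ definition above) =====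
theorem get_fin_frame_spec : Claim_equal_get_fin_frame := by
  intro table _ hpre
  unfold Spec_get_fin_frame
  match table with
  | [] => exact absurd rfl hpre
  | x :: ys =>
    rw [pvA_char]
    simp only [get_fin_frame_alt, PySem.List.slice_from_one, List.tail_cons]
    have hpfx : (x :: ys).foldl (fun ps x => ps ++ [PySem.List.pyGetD ps (-1) 0 + x]) [(0 : Int)]
        = (List.range ((x :: ys).length + 1)).map (fun k => (0 : Int) + ((x :: ys).take k).sum) := by
      have := pvFold_scanl (x :: ys) [] 0
      simp only [List.nil_append] at this
      rw [this, pvScanl_map]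
    rw [hpfx, pvCuts_filterMap]
    have hch : pvChain (fun k => PySem.List.pyGetD ((List.range ((x :: ys).length + 1)).map (fun k => (0 : Int) + ((x :: ys).take k).sum)) k 0) ((0 : Int) + 1) ys :=
      pvChain_suffix (x :: ys) ys ((0 : Int) + 1) (by omega) (by norm_num)
    have hcum : x = PySem.List.pyGetD ((List.range ((x :: ys).length + 1)).map (fun k => (0 : Int) + ((x :: ys).take k).sum)) ((0 : Int) + 1) 0
        - PySem.List.pyGetD ((List.range ((x :: ys).length + 1)).map (fun k => (0 : Int) + ((x :: ys).take k).sum)) 0 0 := by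
      rw [pvPfx_get (x :: ys) ((0 : Int) + 1) (by omega) (by simp only [List.length_cons]; push_cast; omega),
          pvPfx_get (x :: ys) 0 (by omega) (by simp only [List.length_cons]; push_cast; omega)]
      norm_num
    rw [pvSums_zipmap ys _ x 0 0 x hch hcum]
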